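-- pv_equiv track=rewrite | github.com/CILIWFES/MyPythonStudy | DecisionTree/Genrator.py | getFeatureInfo
-- ===== SOURCE A (Python) =====
-- def getFeatureInfo(trainSet, rows, featurIndex):
--     retDic = {}
--     for index in rows:
--         item = trainSet[index][featurIndex]
--         label = trainSet[index][-1]
--
--         if item in retDic:
--             retDic[item]["all"] += 1
--         else:
--             retDic[item] = {"all": 1}
--
--         if label in retDic[item]:
--             retDic[item][label] += 1
--         else:
--             retDic[item][label] = 1
--     return retDic
-- ===== SOURCE B (Python) =====
-- def getFeatureInfo(trainSet, rows, featurIndex):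
--     # pass 1: group the labels of the selected rows by feature value
--     groups = {}
--     for index in rows:
--         groups.setdefault(trainSet[index][featurIndex], []).append(trainSet[index][-1])
--     # pass 2: build each inner dict from {"all": total} plus per-label counts
--     result = {}
--     for item, labels in groups.items():
--         inner = {"all": len(labels)}
--         for label in labels:
--             inner[label] = inner.get(label, 0) + 1
--         result[item] = inner
--     return result
-- ===== Notes on version B (the rewrite author's own statement) =====
-- stated objective: alternative
-- what changed: A counts both totals and per-label counts in one interleaved loop over the selected rows; B first groups labels by feature value in one pass, then in a second pass builds each inner dict by seeding {"all": total} and folding in the labels.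
import Mathlib
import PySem

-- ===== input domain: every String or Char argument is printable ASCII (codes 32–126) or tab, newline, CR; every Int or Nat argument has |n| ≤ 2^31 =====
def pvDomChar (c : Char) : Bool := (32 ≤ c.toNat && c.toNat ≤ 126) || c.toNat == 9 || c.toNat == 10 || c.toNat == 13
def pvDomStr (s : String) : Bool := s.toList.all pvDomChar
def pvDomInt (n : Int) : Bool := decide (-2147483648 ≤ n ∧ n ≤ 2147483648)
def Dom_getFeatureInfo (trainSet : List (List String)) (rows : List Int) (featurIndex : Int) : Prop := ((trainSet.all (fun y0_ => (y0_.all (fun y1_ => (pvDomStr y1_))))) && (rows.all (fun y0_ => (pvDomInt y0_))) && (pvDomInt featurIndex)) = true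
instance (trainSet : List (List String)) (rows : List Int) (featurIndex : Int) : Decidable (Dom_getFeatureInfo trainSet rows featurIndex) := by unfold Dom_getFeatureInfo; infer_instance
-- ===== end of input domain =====

-- B replaces A's single interleaved counting loop by two passes (group labels by feature value, then build each
-- inner count dict from a seeded {"all": total}); objective: alternative decomposition, same asymptotic cost.


-- ===== PORT A =====
def getFeatureInfo (trainSet : List (List String)) (rows : List Int) (featurIndex : Int) : List (String × List (String × Int)) :=
  let retDic : PySem.Dict String (PySem.Dict String Int) :=
    rows.foldl (fun retDic index =>
      let row := PySem.List.pyGetD trainSet index []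
      let item := PySem.List.pyGetD row featurIndex ""
      let label := PySem.List.pyGetD row (-1) ""
      let retDic :=
        if retDic.contains item then
          retDic.modify item PySem.Dict.empty (fun inner => inner.modify "all" 0 (· + 1))
        else
          retDic.insert item (PySem.Dict.ofList [("all", 1)])
      let inner := retDic.getD item PySem.Dict.empty
      if inner.contains label then
        retDic.insert item (inner.modify label 0 (· + 1))
      else
        retDic.insert item (inner.insert label 1)) PySem.Dict.empty
  retDic.items.map (fun p => (p.1, p.2.items))

-- ===== PORT B =====
def getFeatureInfo_alt (trainSet : List (List String)) (rows : List Int) (featurIndex : Int) : List (String × List (String × Int)) :=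
  let groups : PySem.Dict String (List String) :=
    rows.foldl (fun g index =>
      let row := PySem.List.pyGetD trainSet index []
      g.modify (PySem.List.pyGetD row featurIndex "") [] (· ++ [PySem.List.pyGetD row (-1) ""])) PySem.Dict.empty
  groups.items.map (fun p =>
    let inner := p.2.foldl (fun inn label => inn.insert label (inn.getD label 0 + 1))
      (PySem.Dict.ofList [("all", (p.2.length : Int))])
    (p.1, inner.items))

-- ===== PRECONDITION & SPEC =====
-- Pre_ excludes exactly the inputs where Python A raises IndexError: a row index outside trainSet,
-- an empty selected row (row[-1]), or featurIndex outside the selected row.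
def Pre_getFeatureInfo (trainSet : List (List String)) (rows : List Int) (featurIndex : Int) : Prop :=
  ∀ i ∈ rows, PySem.Raise.InRange trainSet.length i ∧
    PySem.List.pyGetD trainSet i [] ≠ [] ∧
    PySem.Raise.InRange (PySem.List.pyGetD trainSet i []).length featurIndex
instance (trainSet : List (List String)) (rows : List Int) (featurIndex : Int) : Decidable (Pre_getFeatureInfo trainSet rows featurIndex) := by unfold Pre_getFeatureInfo; infer_instance

def pvWitness_getFeatureInfo : List (List String) × List Int × Int :=
  ([["a", "yes"], ["b", "no"], ["a", "no"]], [0, 1, 2, -1], 0)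

def Spec_getFeatureInfo (trainSet : List (List String)) (rows : List Int) (featurIndex : Int) (out : List (String × List (String × Int))) : Prop := out = getFeatureInfo_alt trainSet rows featurIndex
instance (trainSet : List (List String)) (rows : List Int) (featurIndex : Int) (out : List (String × List (String × Int))) : Decidable (Spec_getFeatureInfo trainSet rows featurIndex out) := by unfold Spec_getFeatureInfo; infer_instance

-- ===== CLAIM (what is proved, stated in full; the proofs are below) =====
def Claim_equal_getFeatureInfo : Prop := ∀ (trainSet : List (List String)) (rows : List Int) (featurIndex : Int), Dom_getFeatureInfo trainSet rows featurIndex → Pre_getFeatureInfo trainSet rows featurIndex → Spec_getFeatureInfo trainSet rows featurIndex (getFeatureInfo trainSet rows featurIndex)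

-- ===== LEMMAS AND PROOFS =====

-- B's inner counting step: inn[label] = inn.get(label, 0) + 1
def pvIns (inn : PySem.Dict String Int) (label : String) : PySem.Dict String Int :=
  inn.insert label (inn.getD label 0 + 1)

-- B's inner dict for a label list
def pvBuild (ls : List String) : PySem.Dict String Int :=
  ls.foldl pvIns (PySem.Dict.ofList [("all", (ls.length : Int))])

-- A's dict state, rendered from B's grouping state
def pvRender (g : PySem.Dict String (List String)) : PySem.Dict String (PySem.Dict String Int) :=
  PySem.Dict.mk (g.items.map (fun p => (p.1, pvBuild p.2)))

-- the inner dict A carries for `item` just after its first conditional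
def pvSeedOf (d : PySem.Dict String (PySem.Dict String Int)) (item : String) : PySem.Dict String Int :=
  if d.contains item then
    (d.getD item PySem.Dict.empty).insert "all" ((d.getD item PySem.Dict.empty).getD "all" 0 + 1)
  else PySem.Dict.ofList [("all", 1)]

lemma pv_ins_pos {ν : Type} (e : PySem.Dict String ν) (k : String) (v : ν) (h : e.contains k = true) :
    e.insert k v = PySem.Dict.mk (e.items.map (fun p => if p.1 == k then (k, v) else p)) := by
  simp [PySem.Dict.insert, h]

lemma pv_ins_neg {ν : Type} (e : PySem.Dict String ν) (k : String) (v : ν) (h : e.contains k = false) :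
    e.insert k v = PySem.Dict.mk (e.items ++ [(k, v)]) := by
  simp [PySem.Dict.insert, h]

lemma pv_insert_comm {ν : Type} (d : PySem.Dict String ν) (k k' : String) (w v : ν)
    (hne : k' ≠ k) (hk : d.contains k = true) :
    (d.insert k w).insert k' v = (d.insert k' v).insert k w := by
  have hck' : (d.insert k w).contains k' = d.contains k' := by
    rw [PySem.Dict.contains_insert]; simp [hne]
  have hck : (d.insert k' v).contains k = true := by
    rw [PySem.Dict.contains_insert]; simp [hk]
  apply PySem.Dict.ext
  by_cases hk' : d.contains k' = true
  · rw [pv_ins_pos _ k' v (by rw [hck']; exact hk'), pv_ins_pos _ k w hck,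
      pv_ins_pos _ k w hk, pv_ins_pos _ k' v hk']
    simp only [List.map_map]
    refine List.map_congr_left ?_
    intro p _
    by_cases h1 : p.1 = k <;> by_cases h2 : p.1 = k' <;>
      simp [h1, h2, hne, Ne.symm hne]
  · rw [pv_ins_neg _ k' v (by rw [hck']; simpa using hk'), pv_ins_pos _ k w hck,
      pv_ins_pos _ k w hk, pv_ins_neg _ k' v (by simpa using hk')]
    simp [List.map_append]
    exact fun h => absurd h hne

lemma pvRender_contains (g : PySem.Dict String (List String)) (k : String) :
    (pvRender g).contains k = g.contains k := by
  simp [pvRender, PySem.Dict.contains, List.any_map, Function.comp_def]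

lemma pvRender_get? (g : PySem.Dict String (List String)) (k : String) :
    (pvRender g).get? k = (g.get? k).map pvBuild := by
  simp [pvRender, PySem.Dict.get?, List.find?_map, Function.comp_def, Option.map_map]

lemma pvIns_insert_all_comm (d : PySem.Dict String Int) (x : String)
    (h : d.contains "all" = true) :
    pvIns (d.insert "all" (d.getD "all" 0 + 1)) x
      = (pvIns d x).insert "all" ((pvIns d x).getD "all" 0 + 1) := by
  by_cases hx : x = "all"
  · subst hx
    simp [pvIns, PySem.Dict.getD_insert_self, PySem.Dict.insert_insert_self]
  · have h1 : (d.insert "all" (d.getD "all" 0 + 1)).getD x 0 = d.getD x 0 :=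
      PySem.Dict.getD_insert_of_ne d _ _ hx
    have h2 : (pvIns d x).getD "all" 0 = d.getD "all" 0 :=
      PySem.Dict.getD_insert_of_ne d _ _ (Ne.symm hx)
    rw [h2]
    simp only [pvIns, h1]
    exact pv_insert_comm d "all" x _ _ hx h

lemma pvFoldl_ins_all (ls : List String) (d : PySem.Dict String Int)
    (h : d.contains "all" = true) :
    ls.foldl pvIns (d.insert "all" (d.getD "all" 0 + 1))
      = (ls.foldl pvIns d).insert "all" ((ls.foldl pvIns d).getD "all" 0 + 1) := by
  induction ls generalizing d with
  | nil => rfl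
  | cons x ls ih =>
    simp only [List.foldl_cons]
    rw [pvIns_insert_all_comm d x h, ih (pvIns d x)]
    simp [pvIns, PySem.Dict.contains_insert, h]

lemma pvSeed_eq (n : Int) : PySem.Dict.ofList [("all", n)] = PySem.Dict.mk [("all", n)] := rfl

lemma pvSeed_contains_all (n : Int) : (PySem.Dict.ofList [("all", n)]).contains "all" = true := by
  rw [pvSeed_eq]; simp [PySem.Dict.contains]

lemma pvSeed_getD_all (n : Int) : (PySem.Dict.ofList [("all", n)]).getD "all" 0 = n := by
  rw [pvSeed_eq]; simp [PySem.Dict.getD, PySem.Dict.get?]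

lemma pvBuild_snoc (ls : List String) (label : String) :
    pvBuild (ls ++ [label])
      = pvIns ((pvBuild ls).insert "all" ((pvBuild ls).getD "all" 0 + 1)) label := by
  have hseed : PySem.Dict.ofList [("all", ((ls ++ [label]).length : Int))]
      = (PySem.Dict.ofList [("all", (ls.length : Int))]).insert "all"
          ((PySem.Dict.ofList [("all", (ls.length : Int))]).getD "all" 0 + 1) := by
    rw [pvSeed_getD_all, pvSeed_eq, pvSeed_eq]
    apply PySem.Dict.ext
    simp [PySem.Dict.insert, PySem.Dict.contains]
  simp only [pvBuild, List.foldl_append, List.foldl_cons, List.foldl_nil, hseed]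
  rw [pvFoldl_ins_all ls _ (pvSeed_contains_all _)]

lemma pvRender_insert (g : PySem.Dict String (List String)) (k : String) (v : List String) :
    pvRender (g.insert k v) = (pvRender g).insert k (pvBuild v) := by
  by_cases hc : g.contains k = true
  · rw [pv_ins_pos _ k v hc, pv_ins_pos _ k (pvBuild v) (by rw [pvRender_contains]; exact hc)]
    apply PySem.Dict.ext
    simp only [pvRender, List.map_map]
    refine List.map_congr_left ?_
    intro p _
    by_cases h1 : p.1 = k <;> simp [h1]
  · rw [pv_ins_neg _ k v (by simpa using hc),
      pv_ins_neg _ k (pvBuild v) (by rw [pvRender_contains]; simpa using hc)]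
    apply PySem.Dict.ext
    simp [pvRender]

-- A's loop body, with its in-place updates unfolded, is a single insert of pvIns of pvSeedOf
lemma pvAstep_eq (d : PySem.Dict String (PySem.Dict String Int)) (item label : String) :
    (let d1 :=
        if d.contains item then
          d.modify item PySem.Dict.empty (fun inner => inner.modify "all" 0 (· + 1))
        else
          d.insert item (PySem.Dict.ofList [("all", 1)])
      let inner := d1.getD item PySem.Dict.empty
      if inner.contains label then
        d1.insert item (inner.modify label 0 (· + 1))
      else
        d1.insert item (inner.insert label 1))
    = d.insert item (pvIns (pvSeedOf d item) label) := by
  have hd1 : (if d.contains item then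
        d.modify item PySem.Dict.empty (fun inner => inner.modify "all" 0 (· + 1))
      else d.insert item (PySem.Dict.ofList [("all", 1)])) = d.insert item (pvSeedOf d item) := by
    by_cases hc : d.contains item = true <;> simp [PySem.Dict.modify, pvSeedOf, hc]
  simp only [hd1]
  simp only [PySem.Dict.getD_insert_self, PySem.Dict.modify, PySem.Dict.insert_insert_self]
  by_cases hl : (pvSeedOf d item).contains label = true
  · simp [hl, pvIns]
  · simp [hl, pvIns, PySem.Dict.getD_of_not_contains (pvSeedOf d item) _ (by simpa using hl)]

-- the outer commuting step: A's body on a rendered state renders B's body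
lemma pvOuter_step (g : PySem.Dict String (List String)) (item label : String) :
    (pvRender g).insert item (pvIns (pvSeedOf (pvRender g) item) label)
      = pvRender (g.modify item [] (· ++ [label])) := by
  rw [PySem.Dict.modify, pvRender_insert]
  congr 1
  by_cases hc : g.contains item = true
  · have hsome : ∃ ls, g.get? item = some ls := by
      rcases h : g.get? item with _ | ls
      · rw [PySem.Dict.get?_eq_none_iff_contains] at h
        simp [h] at hc
      · exact ⟨ls, rfl⟩
    obtain ⟨ls, hls⟩ := hsome
    have h1 : (pvRender g).getD item PySem.Dict.empty = pvBuild ls := by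
      simp [PySem.Dict.getD, pvRender_get?, hls]
    have h2 : g.getD item [] = ls := PySem.Dict.getD_of_get?_eq_some g _ hls
    rw [pvSeedOf, if_pos (by rw [pvRender_contains]; exact hc), h1, h2, pvBuild_snoc]
  · have h2 : g.getD item [] = [] := PySem.Dict.getD_of_not_contains g _ (by simpa using hc)
    rw [pvSeedOf, if_neg (by rw [pvRender_contains]; simpa using hc), h2]
    simp only [List.nil_append, pvBuild, List.foldl_cons, List.foldl_nil, List.length_cons,
      List.length_nil, Nat.zero_add, Nat.cast_one]

lemma pvFold_eq (trainSet : List (List String)) (featurIndex : Int) (rows : List Int)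
    (g : PySem.Dict String (List String)) :
    rows.foldl (fun retDic index =>
      let row := PySem.List.pyGetD trainSet index []
      let item := PySem.List.pyGetD row featurIndex ""
      let label := PySem.List.pyGetD row (-1) ""
      let retDic :=
        if retDic.contains item then
          retDic.modify item PySem.Dict.empty (fun inner => inner.modify "all" 0 (· + 1))
        else
          retDic.insert item (PySem.Dict.ofList [("all", 1)])
      let inner := retDic.getD item PySem.Dict.empty
      if inner.contains label then
        retDic.insert item (inner.modify label 0 (· + 1))
      else
        retDic.insert item (inner.insert label 1)) (pvRender g)
    = pvRender (rows.foldl (fun g index =>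
        let row := PySem.List.pyGetD trainSet index []
        g.modify (PySem.List.pyGetD row featurIndex "") [] (· ++ [PySem.List.pyGetD row (-1) ""])) g) := by
  induction rows generalizing g with
  | nil => rfl
  | cons i rows ih =>
    simp only [List.foldl_cons]
    rw [pvAstep_eq, pvOuter_step]
    exact ih _

-- ===== VERDICT (by name: the statement is the Claim_ definition above) =====
theorem getFeatureInfo_spec : Claim_equal_getFeatureInfo := by
  intro trainSet rows featurIndex _ _
  unfold Spec_getFeatureInfo getFeatureInfo getFeatureInfo_alt
  have h0 : (PySem.Dict.empty : PySem.Dict String (PySem.Dict String Int)) = pvRender PySem.Dict.empty := rfl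
  rw [h0, pvFold_eq]
  simp only [pvRender, List.map_map]
  rfl
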